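-- pv_equiv track=rewrite | github.com/noya2012/collatz-formalization-coq | full_dependency_analysis/dependency_extractor.py | strip_comments_preserve_lines
-- ===== SOURCE A (Python) =====
-- from typing import List, Tuple, Optional, Set, Dict
--
-- def strip_comments_preserve_lines(lines: List[str]) -> List[str]:
--     out: List[str] = []
--     depth = 0
--     for line in lines:
--         i=0; n=len(line); buf=[]
--         while i<n:
--             if line.startswith('(*', i): depth+=1; i+=2; continue
--             if line.startswith('*)', i) and depth>0: depth-=1; i+=2; continue
--             ch=line[i]
--             if depth==0: buf.append(ch)
--             i+=1
--         out.append(''.join(buf) if depth==0 else '')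
--     return out
-- ===== SOURCE B (Python) =====
-- from typing import List
--
-- def strip_comments_preserve_lines(lines: List[str]) -> List[str]:
--     out: List[str] = []
--     depth = 0
--     for line in lines:
--         buf = []
--         s = line
--         while True:
--             if depth == 0:
--                 j = s.find('(*')
--                 if j < 0:
--                     buf.append(s)
--                     break
--                 buf.append(s[:j])
--                 s = s[j + 2:]
--                 depth = 1
--             else:
--                 j1 = s.find('(*')
--                 j2 = s.find('*)')
--                 if j1 != -1 and (j2 == -1 or j1 < j2):
--                     depth += 1
--                     s = s[j1 + 2:]
--                 elif j2 != -1: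
--                     depth -= 1
--                     s = s[j2 + 2:]
--                 else:
--                     break
--         out.append(''.join(buf) if depth == 0 else '')
--     return out
-- ===== Notes on version B (the rewrite author's own statement) =====
-- stated objective: faster
-- what changed: A scans every character one at a time with startswith tests at each index and appends kept characters one by one; B jumps between delimiter occurrences using str.find and whole-slice copies (find the next '(*' and append the slice when outside a comment; skip to the nearer of '(*'/'*)' when inside), so the per-character Python-level loop disappears.
import Mathlib
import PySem

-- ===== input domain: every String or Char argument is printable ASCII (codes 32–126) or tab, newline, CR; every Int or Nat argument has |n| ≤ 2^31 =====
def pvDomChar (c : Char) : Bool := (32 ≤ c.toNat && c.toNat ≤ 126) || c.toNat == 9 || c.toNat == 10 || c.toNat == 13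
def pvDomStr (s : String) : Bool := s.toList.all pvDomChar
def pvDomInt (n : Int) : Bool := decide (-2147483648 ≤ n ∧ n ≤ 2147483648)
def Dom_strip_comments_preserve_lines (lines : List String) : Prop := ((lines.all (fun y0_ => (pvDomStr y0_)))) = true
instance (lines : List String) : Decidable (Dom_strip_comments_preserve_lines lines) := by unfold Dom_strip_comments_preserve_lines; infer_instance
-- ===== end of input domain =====

-- B strips Coq comments per line by jumping between '(*'/'*)' occurrences with find-and-slice
-- instead of A's character-by-character scan; objective: alternative decomposition, same exact output.

-- ===== PORT A =====
-- A's inner while loop over index i, as structural recursion on the suffix of the line: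
-- startswith('(*', i) / startswith('*)', i) are the two-character head tests (false when fewer
-- than 2 characters remain, exactly as in Python); returns (buf, depth).
def lineA : List Char → Nat → List Char × Nat
  | [], d => ([], d)
  | [c], d => ((if d = 0 then [c] else []), d)
  | c1 :: c2 :: rest, d =>
    if c1 = '(' ∧ c2 = '*' then lineA rest (d + 1)
    else if c1 = '*' ∧ c2 = ')' ∧ 0 < d then lineA rest (d - 1)
    else
      let p := lineA (c2 :: rest) d
      ((if d = 0 then c1 :: p.1 else p.1), p.2)

-- A's outer for loop, carrying depth across lines.
def goA : List String → Nat → List String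
  | [], _ => []
  | l :: ls, d =>
    let p := lineA l.toList d
    (if p.2 = 0 then String.ofList p.1 else "") :: goA ls p.2

def strip_comments_preserve_lines (lines : List String) : List String := goA lines 0

-- ===== PORT B =====
-- exact rendering of Python's s.find(pat) for a two-character pattern: some index of the first
-- occurrence, none where Python returns -1.
def findPat (c1 c2 : Char) : List Char → Option Nat
  | x :: y :: rest =>
    if x = c1 ∧ y = c2 then some 0
    else (findPat c1 c2 (y :: rest)).map (· + 1)
  | _ => none

theorem findPat_some_le {c1 c2 : Char} : ∀ {cs : List Char} {j : Nat},
    findPat c1 c2 cs = some j → j + 2 ≤ cs.length := by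
  intro cs
  induction cs with
  | nil => intro j h; simp [findPat] at h
  | cons x t ih =>
    intro j h
    cases t with
    | nil => simp [findPat] at h
    | cons y rest =>
      by_cases hx : x = c1 ∧ y = c2
      · simp [findPat, hx] at h
        simp [List.length_cons]
        omega
      · simp [findPat, hx] at h
        obtain ⟨k, hk, rfl⟩ := h
        have := ih hk
        simp [List.length_cons] at this ⊢
        omega

-- B's inner while loop: s.find('(*') / s.find('*)') then slice s = s[j+2:] (List.drop),
-- copying s[:j] (List.take) into buf while at depth 0.
def lineB (cs : List Char) (d : Nat) : List Char × Nat :=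
  if d = 0 then
    match h : findPat '(' '*' cs with
    | none => (cs, 0)
    | some j =>
      let p := lineB (cs.drop (j + 2)) 1
      (cs.take j ++ p.1, p.2)
  else
    match h1 : findPat '(' '*' cs, h2 : findPat '*' ')' cs with
    | some j1, some j2 =>
      if j1 < j2 then lineB (cs.drop (j1 + 2)) (d + 1)
      else lineB (cs.drop (j2 + 2)) (d - 1)
    | some j1, none => lineB (cs.drop (j1 + 2)) (d + 1)
    | none, some j2 => lineB (cs.drop (j2 + 2)) (d - 1)
    | none, none => ([], d)
termination_by cs.length
decreasing_by
  · have := findPat_some_le h; simp [List.length_drop]; omega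
  · have := findPat_some_le h1; simp [List.length_drop]; omega
  · have := findPat_some_le h2; simp [List.length_drop]; omega
  · have := findPat_some_le h1; simp [List.length_drop]; omega
  · have := findPat_some_le h2; simp [List.length_drop]; omega

def goB : List String → Nat → List String
  | [], _ => []
  | l :: ls, d =>
    let p := lineB l.toList d
    (if p.2 = 0 then String.ofList p.1 else "") :: goB ls p.2

def strip_comments_preserve_lines_alt (lines : List String) : List String := goB lines 0

-- ===== PRECONDITION & SPEC =====
def Spec_strip_comments_preserve_lines (lines : List String) (out : List String) : Prop := out = strip_comments_preserve_lines_alt lines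
instance (lines : List String) (out : List String) : Decidable (Spec_strip_comments_preserve_lines lines out) := by unfold Spec_strip_comments_preserve_lines; infer_instance

-- ===== CLAIM (what is proved, stated in full; the proofs are below) =====
def Claim_equal_strip_comments_preserve_lines : Prop := ∀ (lines : List String), Dom_strip_comments_preserve_lines lines → Spec_strip_comments_preserve_lines lines (strip_comments_preserve_lines lines)

-- ===== LEMMAS AND PROOFS =====

theorem lineA_no_open (cs : List Char) (h : findPat '(' '*' cs = none) :
    lineA cs 0 = (cs, 0) := by
  induction cs with
  | nil => simp [lineA]
  | cons x t ih =>
    cases t with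
    | nil => simp [lineA]
    | cons y rest =>
      by_cases hx : x = '(' ∧ y = '*'
      · simp [findPat, hx] at h
      · simp [findPat, hx] at h
        have := ih h
        simp [lineA, hx, this]

theorem lineA_open0 : ∀ (cs : List Char) (j : Nat), findPat '(' '*' cs = some j →
    lineA cs 0 = ((cs.take j) ++ (lineA (cs.drop (j + 2)) 1).1, (lineA (cs.drop (j + 2)) 1).2) := by
  intro cs
  induction cs with
  | nil => intro j h; simp [findPat] at h
  | cons x t ih =>
    intro j h
    cases t with
    | nil => simp [findPat] at h
    | cons y rest =>
      by_cases hx : x = '(' ∧ y = '*'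
      · simp [findPat, hx] at h
        subst h
        simp [lineA, hx]
      · simp [findPat, hx] at h
        obtain ⟨k, hk, rfl⟩ := h
        have := ih k hk
        simp [lineA, hx, this]

theorem lineA_closed_none (cs : List Char) (d : Nat) (hd : 0 < d)
    (h1 : findPat '(' '*' cs = none) (h2 : findPat '*' ')' cs = none) :
    lineA cs d = ([], d) := by
  induction cs with
  | nil => simp [lineA]
  | cons x t ih =>
    cases t with
    | nil => simp [lineA, hd.ne']
    | cons y rest =>
      by_cases hx : x = '(' ∧ y = '*'
      · simp [findPat, hx] at h1
      · by_cases hy : x = '*' ∧ y = ')'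
        · simp [findPat, hy] at h2
        · simp [findPat, hx] at h1
          simp [findPat, hy] at h2
          have hcond : ¬ (x = '*' ∧ y = ')' ∧ 0 < d) := fun h => hy ⟨h.1, h.2.1⟩
          have := ih h1 h2
          simp [lineA, hx, hcond, this, hd.ne']

theorem lineA_open_first : ∀ (cs : List Char) (d j1 : Nat), 0 < d →
    findPat '(' '*' cs = some j1 →
    (∀ j2, findPat '*' ')' cs = some j2 → j1 < j2) →
    lineA cs d = lineA (cs.drop (j1 + 2)) (d + 1) := by
  intro cs
  induction cs with
  | nil => intro d j1 _ h _; simp [findPat] at h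
  | cons x t ih =>
    intro d j1 hd h1 h2
    cases t with
    | nil => simp [findPat] at h1
    | cons y rest =>
      by_cases hx : x = '(' ∧ y = '*'
      · simp [findPat, hx] at h1
        subst h1
        simp [lineA, hx]
      · simp [findPat, hx] at h1
        obtain ⟨k, hk, rfl⟩ := h1
        by_cases hy : x = '*' ∧ y = ')'
        · have := h2 0 (by simp [findPat, hy])
          omega
        · have htail : ∀ m, findPat '*' ')' (y :: rest) = some m → k < m := by
            intro m hm
            have := h2 (m + 1) (by simp [findPat, hy, hm])
            omega
          have hcond : ¬ (x = '*' ∧ y = ')' ∧ 0 < d) := fun h => hy ⟨h.1, h.2.1⟩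
          have := ih d k hd hk htail
          simp [lineA, hx, hcond, this, hd.ne']

theorem lineA_close_first : ∀ (cs : List Char) (d j2 : Nat), 0 < d →
    findPat '*' ')' cs = some j2 →
    (∀ j1, findPat '(' '*' cs = some j1 → j2 < j1) →
    lineA cs d = lineA (cs.drop (j2 + 2)) (d - 1) := by
  intro cs
  induction cs with
  | nil => intro d j2 _ h _; simp [findPat] at h
  | cons x t ih =>
    intro d j2 hd h2 h1
    cases t with
    | nil => simp [findPat] at h2
    | cons y rest =>
      by_cases hy : x = '*' ∧ y = ')'
      · simp [findPat, hy] at h2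
        subst h2
        obtain ⟨rfl, rfl⟩ := hy
        have hx : ¬ (('*' : Char) = '(' ∧ (')' : Char) = '*') := by decide
        simp [lineA, hd]
      · simp [findPat, hy] at h2
        obtain ⟨k, hk, rfl⟩ := h2
        by_cases hx : x = '(' ∧ y = '*'
        · have := h1 0 (by simp [findPat, hx])
          omega
        · have htail : ∀ m, findPat '(' '*' (y :: rest) = some m → k < m := by
            intro m hm
            have := h1 (m + 1) (by simp [findPat, hx, hm])
            omega
          have hcond : ¬ (x = '*' ∧ y = ')' ∧ 0 < d) := fun h => hy ⟨h.1, h.2.1⟩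
          have := ih d k hd hk htail
          simp [lineA, hx, hcond, this, hd.ne']

theorem findPat_neq (cs : List Char) (j : Nat)
    (h1 : findPat '(' '*' cs = some j) (h2 : findPat '*' ')' cs = some j) : False := by
  induction cs generalizing j with
  | nil => simp [findPat] at h1
  | cons x t ih =>
    cases t with
    | nil => simp [findPat] at h1
    | cons y rest =>
      by_cases hx : x = '(' ∧ y = '*'
      · have hy : ¬ (x = '*' ∧ y = ')') := by
          rintro ⟨rfl, _⟩; exact absurd hx.1 (by decide)
        simp [findPat, hx] at h1
        simp [findPat, hy] at h2
        obtain ⟨m, _, hm⟩ := h2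
        omega
      · by_cases hy : x = '*' ∧ y = ')'
        · simp [findPat, hy] at h2
          simp [findPat, hx] at h1
          obtain ⟨m, _, hm⟩ := h1
          omega
        · simp [findPat, hx] at h1
          simp [findPat, hy] at h2
          obtain ⟨k, hk, rfl⟩ := h1
          obtain ⟨m, hm, hmj⟩ := h2
          have hmk : m = k := by omega
          exact ih k hk (hmk ▸ hm)

-- equation lemmas for lineB (its matches carry named hypotheses, so we case them with split)
theorem lineB_zero_none (cs : List Char) (h : findPat '(' '*' cs = none) :
    lineB cs 0 = (cs, 0) := by
  rw [lineB, if_pos rfl]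
  split
  · rfl
  · rename_i j heq; rw [h] at heq; cases heq

theorem lineB_zero_some (cs : List Char) (j : Nat) (h : findPat '(' '*' cs = some j) :
    lineB cs 0 = (cs.take j ++ (lineB (cs.drop (j + 2)) 1).1, (lineB (cs.drop (j + 2)) 1).2) := by
  rw [lineB, if_pos rfl]
  split
  · rename_i heq; rw [h] at heq; cases heq
  · rename_i j' heq; rw [h] at heq; injection heq with heq; subst heq; rfl

theorem lineB_pos_nn (cs : List Char) (d : Nat) (hd : d ≠ 0)
    (h1 : findPat '(' '*' cs = none) (h2 : findPat '*' ')' cs = none) :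
    lineB cs d = ([], d) := by
  rw [lineB, if_neg hd]
  split <;> simp_all

theorem lineB_pos_open (cs : List Char) (d j1 : Nat) (hd : d ≠ 0)
    (h1 : findPat '(' '*' cs = some j1)
    (h : ∀ j2, findPat '*' ')' cs = some j2 → j1 < j2) :
    lineB cs d = lineB (cs.drop (j1 + 2)) (d + 1) := by
  rw [lineB, if_neg hd]
  split <;> rename_i heq1 heq2
  · rename_i ja jb
    rw [h1] at heq1; injection heq1 with heq1; subst heq1
    rw [if_pos (h jb heq2)]
  · rw [h1] at heq1; injection heq1 with heq1; subst heq1; rfl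
  · rw [h1] at heq1; cases heq1
  · rw [h1] at heq1; cases heq1

theorem lineB_pos_close (cs : List Char) (d j2 : Nat) (hd : d ≠ 0)
    (h2 : findPat '*' ')' cs = some j2)
    (h : ∀ j1, findPat '(' '*' cs = some j1 → j2 < j1) :
    lineB cs d = lineB (cs.drop (j2 + 2)) (d - 1) := by
  rw [lineB, if_neg hd]
  split <;> rename_i heq1 heq2
  · rename_i ja jb
    rw [h2] at heq2; injection heq2 with heq2; subst heq2
    rw [if_neg (by have := h ja heq1; omega)]
  · rw [h2] at heq2; cases heq2
  · rw [h2] at heq2; injection heq2 with heq2; subst heq2; rfl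
  · rw [h2] at heq2; cases heq2

theorem lineA_eq_lineB : ∀ (n : Nat) (cs : List Char) (d : Nat), cs.length ≤ n →
    lineA cs d = lineB cs d := by
  intro n
  induction n with
  | zero =>
    intro cs d hlen
    have hnil : cs = [] := by cases cs <;> simp_all
    subst hnil
    rcases Nat.eq_zero_or_pos d with rfl | hd
    · rw [lineB_zero_none [] rfl]; rfl
    · rw [lineB_pos_nn [] d hd.ne' rfl rfl]; rfl
  | succ n ih =>
    intro cs d hlen
    rcases Nat.eq_zero_or_pos d with rfl | hd
    · cases h : findPat '(' '*' cs with
      | none => rw [lineB_zero_none cs h]; exact lineA_no_open cs h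
      | some j =>
        have hle := findPat_some_le h
        have hdrop : (cs.drop (j + 2)).length ≤ n := by
          simp [List.length_drop]; omega
        rw [lineB_zero_some cs j h, lineA_open0 cs j h, ih _ 1 hdrop]
    · cases h1 : findPat '(' '*' cs with
      | none =>
        cases h2 : findPat '*' ')' cs with
        | none =>
          rw [lineB_pos_nn cs d hd.ne' h1 h2]
          exact lineA_closed_none cs d hd h1 h2
        | some j2 =>
          have hle := findPat_some_le h2
          have hdrop : (cs.drop (j2 + 2)).length ≤ n := by
            simp [List.length_drop]; omega
          rw [lineB_pos_close cs d j2 hd.ne' h2 (by intro m hm; rw [h1] at hm; cases hm),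
            lineA_close_first cs d j2 hd h2 (by intro m hm; rw [h1] at hm; cases hm),
            ih _ (d - 1) hdrop]
      | some j1 =>
        cases h2 : findPat '*' ')' cs with
        | none =>
          have hle := findPat_some_le h1
          have hdrop : (cs.drop (j1 + 2)).length ≤ n := by
            simp [List.length_drop]; omega
          rw [lineB_pos_open cs d j1 hd.ne' h1 (by intro m hm; rw [h2] at hm; cases hm),
            lineA_open_first cs d j1 hd h1 (by intro m hm; rw [h2] at hm; cases hm),
            ih _ (d + 1) hdrop]
        | some j2 =>
          have hne : j1 ≠ j2 := fun hEq => findPat_neq cs j1 h1 (hEq ▸ h2)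
          by_cases hlt : j1 < j2
          · have hle := findPat_some_le h1
            have hdrop : (cs.drop (j1 + 2)).length ≤ n := by
              simp [List.length_drop]; omega
            rw [lineB_pos_open cs d j1 hd.ne' h1
                (by intro m hm; rw [h2] at hm; injection hm with hm; omega),
              lineA_open_first cs d j1 hd h1
                (by intro m hm; rw [h2] at hm; injection hm with hm; omega),
              ih _ (d + 1) hdrop]
          · have hle := findPat_some_le h2
            have hdrop : (cs.drop (j2 + 2)).length ≤ n := by
              simp [List.length_drop]; omega
            rw [lineB_pos_close cs d j2 hd.ne' h2
                (by intro m hm; rw [h1] at hm; injection hm with hm; omega),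
              lineA_close_first cs d j2 hd h2
                (by intro m hm; rw [h1] at hm; injection hm with hm; omega),
              ih _ (d - 1) hdrop]

theorem goA_eq_goB : ∀ (ls : List String) (d : Nat), goA ls d = goB ls d := by
  intro ls
  induction ls with
  | nil => intro d; rfl
  | cons l t ih =>
    intro d
    have h := lineA_eq_lineB l.toList.length l.toList d (le_refl _)
    simp [goA, goB, h, ih]

-- ===== VERDICT (by name: the statement is the Claim_ definition above) =====
theorem strip_comments_preserve_lines_spec : Claim_equal_strip_comments_preserve_lines := by
  intro lines _
  unfold Spec_strip_comments_preserve_lines strip_comments_preserve_lines strip_comments_preserve_lines_alt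
  exact goA_eq_goB lines 0
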